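-- pv_equiv track=rewrite | github.com/TheOddlySeagull/Trin-Pack-Creator | SMP_toolbox_box_converter.py | _normalize_smp_lines
-- ===== SOURCE A (Python) =====
-- def _normalize_smp_lines(data: str):
--     """Join lines that are broken across newlines so each entry starts with 'Element|'.
--
--     Some exports split the 4th field (name) onto the next line. We coalesce subsequent
--     lines until the next line starting with 'Element|'.
--     """
--     raw_lines = [ln.strip() for ln in data.strip().splitlines() if ln.strip()]
--     normalized = []
--     current = ""
--     for ln in raw_lines:
--         if ln.startswith("Element|"):
--             if current:
--                 normalized.append(current)
--             current = ln
--         else: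
--             current += ln  # continue previous line (no extra separator needed)
--     if current:
--         normalized.append(current)
--     return normalized
-- ===== SOURCE B (Python) =====
-- def _normalize_smp_lines(data: str):
--     """Slice-and-join re-implementation: find each segment [i, j) where j is the
--     next line starting with 'Element|', and join the whole slice at once, instead
--     of growing a `current` accumulator line by line."""
--     lines = [ln.strip() for ln in data.strip().splitlines() if ln.strip()]
--     entries = []
--     i, n = 0, len(lines)
--     while i < n:
--         j = i + 1
--         while j < n and not lines[j].startswith("Element|"):
--             j += 1
--         entries.append("".join(lines[i:j]))
--         i = j
--     return entries
-- ===== Notes on version B (the rewrite author's own statement) =====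
-- stated objective: alternative
-- what changed: A grows a `current` accumulator string line by line inside one stateful loop; B instead scans for segment boundaries (lines starting with 'Element|') and builds each entry by slicing the segment and joining it in one ''.join.
import Mathlib
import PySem

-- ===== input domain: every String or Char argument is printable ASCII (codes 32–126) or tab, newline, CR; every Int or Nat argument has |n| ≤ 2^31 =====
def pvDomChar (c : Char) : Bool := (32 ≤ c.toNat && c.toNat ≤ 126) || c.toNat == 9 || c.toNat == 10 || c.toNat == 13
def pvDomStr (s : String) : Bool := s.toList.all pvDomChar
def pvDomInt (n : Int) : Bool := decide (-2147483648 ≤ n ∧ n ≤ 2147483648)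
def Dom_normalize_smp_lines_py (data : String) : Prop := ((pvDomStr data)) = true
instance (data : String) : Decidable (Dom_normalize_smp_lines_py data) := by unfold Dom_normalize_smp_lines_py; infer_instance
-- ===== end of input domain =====

-- B replaces A's line-by-line `current` accumulator with a slice-and-join pass per
-- 'Element|' segment (different decomposition; same return value on every input).

-- shared first line of both Pythons: [ln.strip() for ln in data.strip().splitlines() if ln.strip()]
def pvRawLines (data : String) : List (List Char) :=
  ((PySem.Chars.splitlines (PySem.Chars.strip data.toList)).map PySem.Chars.strip).filter
    (fun ln => ln ≠ [])

-- "Element|" as chars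
def pvElemPrefix : List Char := "Element|".toList

-- ===== PORT A =====
-- the `for ln in raw_lines` loop carrying (normalized, current), plus the final
-- `if current: normalized.append(current)`
def pvLoopA : List (List Char) → List (List Char) → List Char → List (List Char)
  | [], normalized, current =>
      if current ≠ [] then normalized ++ [current] else normalized
  | ln :: ls, normalized, current =>
      if PySem.Chars.startswith ln pvElemPrefix then
        pvLoopA ls (if current ≠ [] then normalized ++ [current] else normalized) ln
      else
        pvLoopA ls normalized (current ++ ln)

def normalize_smp_lines_py (data : String) : List String :=
  (pvLoopA (pvRawLines data) [] []).map String.ofList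

-- ===== PORT B =====
-- Source B's outer while: each iteration takes the segment lines[i:j] (head plus the
-- run of lines not starting with 'Element|') and joins it at once (''.join =
-- flatten at char level)
-- structural (fuel-bounded) transcription of Source B's outer while loop: each step
-- consumes at least the head line, so `lines.length` steps always suffice
def pvChunksBF : Nat → List (List Char) → List (List Char)
  | 0, _ => []
  | _, [] => []
  | fuel + 1, l :: ls =>
      (l ++ (ls.takeWhile (fun x => !(PySem.Chars.startswith x pvElemPrefix))).flatten) ::
        pvChunksBF fuel (ls.dropWhile (fun x => !(PySem.Chars.startswith x pvElemPrefix)))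

def pvChunksB (ls : List (List Char)) : List (List Char) := pvChunksBF ls.length ls

def normalize_smp_lines_py_alt (data : String) : List String :=
  (pvChunksB (pvRawLines data)).map String.ofList

-- ===== PRECONDITION & SPEC =====
def Spec_normalize_smp_lines_py (data : String) (out : List String) : Prop := out = normalize_smp_lines_py_alt data
instance (data : String) (out : List String) : Decidable (Spec_normalize_smp_lines_py data out) := by unfold Spec_normalize_smp_lines_py; infer_instance

-- ===== CLAIM (what is proved, stated in full; the proofs are below) =====
def Claim_equal_normalize_smp_lines_py : Prop := ∀ (data : String), Dom_normalize_smp_lines_py data → Spec_normalize_smp_lines_py data (normalize_smp_lines_py data)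

-- ===== LEMMAS AND PROOFS =====

-- enough fuel: the result only depends on the list
theorem pvChunksBF_congr : ∀ (n m : Nat) (ls : List (List Char)),
    ls.length ≤ n → ls.length ≤ m → pvChunksBF n ls = pvChunksBF m ls := by
  intro n
  induction n with
  | zero =>
      intro m ls hn _
      have : ls = [] := List.eq_nil_of_length_eq_zero (Nat.le_zero.mp hn)
      subst this
      cases m <;> rfl
  | succ n ih =>
      intro m ls hn hm
      cases ls with
      | nil => cases m <;> rfl
      | cons l ls =>
          cases m with
          | zero => simp at hm
          | succ m =>
              simp only [pvChunksBF]
              congr 1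
              exact ih m _
                (le_trans (List.length_dropWhile_le _ ls) (Nat.le_of_succ_le_succ hn))
                (le_trans (List.length_dropWhile_le _ ls) (Nat.le_of_succ_le_succ hm))

-- unfolding equations for pvChunksB
theorem pvChunksB_nil : pvChunksB [] = [] := rfl

theorem pvChunksB_cons (l : List Char) (ls : List (List Char)) :
    pvChunksB (l :: ls) =
      (l ++ (ls.takeWhile (fun x => !(PySem.Chars.startswith x pvElemPrefix))).flatten) ::
        pvChunksB (ls.dropWhile (fun x => !(PySem.Chars.startswith x pvElemPrefix))) := by
  simp only [pvChunksB, List.length_cons, pvChunksBF]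
  congr 1
  exact pvChunksBF_congr _ _ _ (List.length_dropWhile_le _ ls) (le_refl _)

-- A's loop only ever appends to `normalized`
theorem pvLoopA_append (ls : List (List Char)) (normalized : List (List Char))
    (current : List Char) :
    pvLoopA ls normalized current = normalized ++ pvLoopA ls [] current := by
  induction ls generalizing normalized current with
  | nil => simp [pvLoopA]; split <;> simp
  | cons l ls ih =>
      simp only [pvLoopA]
      split
      · rw [ih, ih (if current ≠ [] then [] ++ [current] else [])]
        split <;> simp
      · exact ih _ _

-- with a nonempty pending `current`, A's remaining run is: close the current
-- segment (current plus the run of non-'Element|' lines) and continue on the rest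
theorem pvLoopA_key (ls : List (List Char)) (current : List Char) (h : current ≠ []) :
    pvLoopA ls [] current =
      (current ++ (ls.takeWhile (fun x => !(PySem.Chars.startswith x pvElemPrefix))).flatten) ::
        pvChunksB (ls.dropWhile (fun x => !(PySem.Chars.startswith x pvElemPrefix))) := by
  induction ls generalizing current with
  | nil => simp [pvLoopA, h, pvChunksB_nil]
  | cons l ls ih =>
      by_cases hl : PySem.Chars.startswith l pvElemPrefix
      · have hlne : l ≠ [] := by
          intro he
          rw [he] at hl
          have := (PySem.Chars.startswith_iff [] pvElemPrefix).mp hl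
          simp [List.prefix_nil, pvElemPrefix] at this
        rw [show pvLoopA (l :: ls) [] current = pvLoopA ls [current] l by
              simp [pvLoopA, hl, h],
            pvLoopA_append, ih l hlne]
        simp [hl]
        rw [pvChunksB_cons]
      · have hcl : current ++ l ≠ [] := by simp [h]
        rw [show pvLoopA (l :: ls) [] current = pvLoopA ls [] (current ++ l) by
              simp [pvLoopA, hl],
            ih (current ++ l) hcl]
        simp [hl]

-- starting from empty state, on a list of nonempty lines A's loop computes B's chunks
theorem pvLoopA_eq_chunks (ls : List (List Char)) (hne : ∀ l ∈ ls, l ≠ []) :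
    pvLoopA ls [] [] = pvChunksB ls := by
  cases ls with
  | nil => simp [pvLoopA, pvChunksB_nil]
  | cons l ls =>
      have hl : l ≠ [] := hne l (by simp)
      by_cases hs : PySem.Chars.startswith l pvElemPrefix
      · simp only [pvLoopA, hs, if_pos, ne_eq, not_true, ite_false]
        rw [pvLoopA_key ls l hl, pvChunksB_cons]
      · simp only [pvLoopA, List.nil_append]
        rw [if_neg (by simp [hs]), pvLoopA_key ls l hl, pvChunksB_cons]

theorem pvRawLines_nonempty (data : String) : ∀ l ∈ pvRawLines data, l ≠ [] := by
  intro l hl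
  have := List.of_mem_filter hl
  simpa using this

-- ===== VERDICT (by name: the statement is the Claim_ definition above) =====
theorem normalize_smp_lines_py_spec : Claim_equal_normalize_smp_lines_py := by
  intro data _
  unfold Spec_normalize_smp_lines_py normalize_smp_lines_py normalize_smp_lines_py_alt
  rw [pvLoopA_eq_chunks (pvRawLines data) (pvRawLines_nonempty data)]
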